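-- pv_equiv track=rewrite | github.com/Mektiaventas/Whatsmektia | app - copia.py | get_country_flag
-- ===== SOURCE A (Python) =====
-- PREFIJOS_PAIS = {
--     '52': 'mx', '1': 'us', '54': 'ar', '57': 'co', '55': 'br',
--     '34': 'es', '51': 'pe', '56': 'cl', '58': 've', '593': 'ec',
--     '591': 'bo', '507': 'pa', '502': 'gt'
-- }
--
-- def get_country_flag(numero):
--     if not numero:
--         return None
--     numero = str(numero)
--     if numero.startswith('+'):
--         numero = numero[1:]
--     for i in range(3, 0, -1):
--         prefijo = numero[:i]
--         if prefijo in PREFIJOS_PAIS: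
--             codigo = PREFIJOS_PAIS[prefijo]
--             return f"https://flagcdn.com/24x18/{codigo}.png"
--     return None
-- ===== SOURCE B (Python) =====
-- PREFIJOS_PAIS = {
--     '52': 'mx', '1': 'us', '54': 'ar', '57': 'co', '55': 'br',
--     '34': 'es', '51': 'pe', '56': 'cl', '58': 've', '593': 'ec',
--     '591': 'bo', '507': 'pa', '502': 'gt'
-- }
--
-- def _match_code(s):
--     # hand-rolled decision tree on the leading characters (longest match first by construction)
--     c0 = s[:1]
--     if c0 == '1':
--         return 'us'
--     if c0 == '3':
--         return 'es' if s[1:2] == '4' else None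
--     if c0 == '5':
--         c1 = s[1:2]
--         if c1 == '0':
--             c2 = s[2:3]
--             if c2 == '7':
--                 return 'pa'
--             if c2 == '2':
--                 return 'gt'
--             return None
--         if c1 == '1':
--             return 'pe'
--         if c1 == '2':
--             return 'mx'
--         if c1 == '4':
--             return 'ar'
--         if c1 == '5':
--             return 'br'
--         if c1 == '6':
--             return 'cl'
--         if c1 == '7':
--             return 'co'
--         if c1 == '8':
--             return 've'
--         if c1 == '9':
--             c2 = s[2:3]
--             if c2 == '3':
--                 return 'ec'
--             if c2 == '1':
--                 return 'bo'
--             return None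
--     return None
--
-- def get_country_flag(numero):
--     if not numero:
--         return None
--     s = str(numero)
--     if s.startswith('+'):
--         s = s[1:]
--     codigo = _match_code(s)
--     if codigo is None:
--         return None
--     return f"https://flagcdn.com/24x18/{codigo}.png"
-- ===== Notes on version B (the rewrite author's own statement) =====
-- stated objective: alternative
-- what changed: Replaces the slice-length loop with dict membership + lookup (numero[:3], numero[:2], numero[:1] against PREFIJOS_PAIS) by a hand-rolled decision tree on the leading characters that returns the country code directly, with the URL formatted once at the end.
import Mathlib
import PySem

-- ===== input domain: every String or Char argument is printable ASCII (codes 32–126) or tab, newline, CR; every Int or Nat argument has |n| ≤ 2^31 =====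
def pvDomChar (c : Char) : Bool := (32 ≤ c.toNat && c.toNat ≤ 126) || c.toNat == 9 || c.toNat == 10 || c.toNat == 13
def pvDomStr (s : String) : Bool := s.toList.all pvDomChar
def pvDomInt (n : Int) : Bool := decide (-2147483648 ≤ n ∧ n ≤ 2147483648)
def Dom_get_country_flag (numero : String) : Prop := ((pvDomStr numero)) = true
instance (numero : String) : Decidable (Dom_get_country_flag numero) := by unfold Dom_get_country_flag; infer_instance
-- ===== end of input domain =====

-- B replaces A's slice/dict-lookup loop by a hand-rolled decision tree on the
-- leading characters that yields the country code, formatting the URL once.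

-- ===== PORT A =====
def prefijosPais : PySem.Dict String String := PySem.Dict.ofList
  [("52","mx"),("1","us"),("54","ar"),("57","co"),("55","br"),
   ("34","es"),("51","pe"),("56","cl"),("58","ve"),("593","ec"),
   ("591","bo"),("507","pa"),("502","gt")]

-- for i in range(3, 0, -1): … (early return modelled by recursion over the range list);
-- 'codigo = PREFIJOS_PAIS[prefijo]; return f"…{codigo}.png"' under the contains-guard is
-- ported as Option.map over get? (the none case cannot occur since contains holds).
def aLoop (numero : String) : List Int → Option String
  | [] => none
  | i :: rest =>
    let prefijo := PySem.Str.slice numero none (some i)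
    if prefijosPais.contains prefijo then
      (prefijosPais.get? prefijo).map (fun codigo => "https://flagcdn.com/24x18/" ++ codigo ++ ".png")
    else aLoop numero rest

def get_country_flag (numero : String) : Option String :=
  if numero = "" then none
  else
    -- numero = str(numero) is the identity on a string argument
    let numero := if PySem.Str.startswith numero "+" then PySem.Str.slice numero (some 1) none else numero
    aLoop numero (PySem.List.pyRange 3 0 (-1))

-- ===== PORT B =====
-- _match_code(s): decision tree on s[:1], s[1:2], s[2:3]
def matchCode (s : String) : Option String :=
  let c0 := PySem.Str.slice s none (some 1)
  if c0 = "1" then some "us"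
  else if c0 = "3" then
    (if PySem.Str.slice s (some 1) (some 2) = "4" then some "es" else none)
  else if c0 = "5" then
    let c1 := PySem.Str.slice s (some 1) (some 2)
    if c1 = "0" then
      let c2 := PySem.Str.slice s (some 2) (some 3)
      if c2 = "7" then some "pa"
      else if c2 = "2" then some "gt"
      else none
    else if c1 = "1" then some "pe"
    else if c1 = "2" then some "mx"
    else if c1 = "4" then some "ar"
    else if c1 = "5" then some "br"
    else if c1 = "6" then some "cl"
    else if c1 = "7" then some "co"
    else if c1 = "8" then some "ve"
    else if c1 = "9" then
      let c2 := PySem.Str.slice s (some 2) (some 3)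
      if c2 = "3" then some "ec"
      else if c2 = "1" then some "bo"
      else none
    else none
  else none

def get_country_flag_alt (numero : String) : Option String :=
  if numero = "" then none
  else
    let s := if PySem.Str.startswith numero "+" then PySem.Str.slice numero (some 1) none else numero
    match matchCode s with
    | none => none
    | some codigo => some ("https://flagcdn.com/24x18/" ++ codigo ++ ".png")

-- ===== PRECONDITION & SPEC =====
def Spec_get_country_flag (numero : String) (out : Option String) : Prop := out = get_country_flag_alt numero
instance (numero : String) (out : Option String) : Decidable (Spec_get_country_flag numero out) := by unfold Spec_get_country_flag; infer_instance

-- ===== CLAIM (what is proved, stated in full; the proofs are below) =====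
def Claim_equal_get_country_flag : Prop := ∀ (numero : String), Dom_get_country_flag numero → Spec_get_country_flag numero (get_country_flag numero)

-- ===== LEMMAS AND PROOFS =====

theorem prefijosPais_eq : prefijosPais = PySem.Dict.mk
    [("52","mx"),("1","us"),("54","ar"),("57","co"),("55","br"),
     ("34","es"),("51","pe"),("56","cl"),("58","ve"),("593","ec"),
     ("591","bo"),("507","pa"),("502","gt")] := by decide

theorem slice_to_ofList (l : List Char) (k : Int) (hk : 0 ≤ k) :
    PySem.Str.slice (String.ofList l) none (some k) = String.ofList (l.take k.toNat) := by
  apply String.toList_inj.mp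
  simp [PySem.List.slice_to, hk]

theorem slice_mid_ofList (l : List Char) (i j : Int) (hi : 0 ≤ i) (hj : 0 ≤ j) :
    PySem.Str.slice (String.ofList l) (some i) (some j) =
      String.ofList ((l.drop i.toNat).take (j.toNat - i.toNat)) := by
  apply String.toList_inj.mp
  simp [PySem.List.slice_toNat _ hi hj]

theorem ofList_eq_lit (x : List Char) (s : String) :
    (String.ofList x = s) = (x = s.toList) := by
  rw [eq_iff_iff]
  constructor
  · intro h; rw [← h]; simp
  · intro h; apply String.toList_inj.mp; simpa using h

theorem lit_beq_ofList (s : String) (x : List Char) :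
    (s == String.ofList x) = (s.toList == x) := by
  rw [Bool.eq_iff_iff]
  simp only [beq_iff_eq]
  constructor
  · intro h; rw [h]; simp
  · intro h; apply String.toList_inj.mp; simpa using h

set_option maxHeartbeats 1000000 in
theorem case_nil : aLoop (String.ofList []) [3,2,1] =
    (match matchCode (String.ofList []) with
     | none => none
     | some codigo => some ("https://flagcdn.com/24x18/" ++ codigo ++ ".png")) := by
  decide

set_option maxHeartbeats 1000000 in
theorem case_one (a : Char) : aLoop (String.ofList [a]) [3,2,1] =
    (match matchCode (String.ofList [a]) with
     | none => none
     | some codigo => some ("https://flagcdn.com/24x18/" ++ codigo ++ ".png")) := by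
  simp only [aLoop, matchCode, prefijosPais_eq]
  rw [slice_mid_ofList _ 1 2 (by norm_num) (by norm_num),
      slice_mid_ofList _ 2 3 (by norm_num) (by norm_num)]
  simp only [PySem.Dict.contains_mk, PySem.Dict.get?_mk_cons, List.any_cons, List.any_nil,
    slice_to_ofList _ 3 (by norm_num), slice_to_ofList _ 2 (by norm_num),
    slice_to_ofList _ 1 (by norm_num), lit_beq_ofList, ofList_eq_lit]
  simp only [show Int.toNat 3 = 3 from rfl, show Int.toNat 2 = 2 from rfl,
    show Int.toNat 1 = 1 from rfl,
    show ∀ (x : Char), ([x]).take 3 = [x] from fun _ => rfl,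
    show ∀ (x : Char), ([x]).take 2 = [x] from fun _ => rfl,
    show ∀ (x : Char), ([x]).take 1 = [x] from fun _ => rfl,
    show ∀ (x : Char), (([x]).drop 1).take 1 = [] from fun _ => rfl,
    show ∀ (x : Char), (([x]).drop 2).take 1 = [] from fun _ => rfl]
  simp only [show ("52").toList = ['5','2'] from by decide, show ("1").toList = ['1'] from by decide,
    show ("54").toList = ['5','4'] from by decide, show ("57").toList = ['5','7'] from by decide,
    show ("55").toList = ['5','5'] from by decide, show ("34").toList = ['3','4'] from by decide,
    show ("51").toList = ['5','1'] from by decide, show ("56").toList = ['5','6'] from by decide,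
    show ("58").toList = ['5','8'] from by decide, show ("593").toList = ['5','9','3'] from by decide,
    show ("591").toList = ['5','9','1'] from by decide, show ("507").toList = ['5','0','7'] from by decide,
    show ("502").toList = ['5','0','2'] from by decide,
    show ("4").toList = ['4'] from by decide, show ("0").toList = ['0'] from by decide,
    show ("2").toList = ['2'] from by decide, show ("3").toList = ['3'] from by decide,
    show ("5").toList = ['5'] from by decide, show ("6").toList = ['6'] from by decide,
    show ("7").toList = ['7'] from by decide, show ("8").toList = ['8'] from by decide,
    show ("9").toList = ['9'] from by decide]
  simp only [beq_iff_eq, List.cons.injEq, and_true, Bool.or_eq_true, Bool.false_eq_true, or_false,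
    reduceCtorEq, false_and, and_false, false_or]
  by_cases ha1 : '1' = a
  · subst ha1; simp
  by_cases ha3 : '3' = a
  · subst ha3; simp
  by_cases ha5 : '5' = a
  · subst ha5; simp
  · simp [ha1, ha3, ha5, Ne.symm ha1, Ne.symm ha3, Ne.symm ha5]

set_option maxHeartbeats 1000000 in
theorem case_two (a b : Char) : aLoop (String.ofList [a,b]) [3,2,1] =
    (match matchCode (String.ofList [a,b]) with
     | none => none
     | some codigo => some ("https://flagcdn.com/24x18/" ++ codigo ++ ".png")) := by
  simp only [aLoop, matchCode, prefijosPais_eq]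
  rw [slice_mid_ofList _ 1 2 (by norm_num) (by norm_num),
      slice_mid_ofList _ 2 3 (by norm_num) (by norm_num)]
  simp only [PySem.Dict.contains_mk, PySem.Dict.get?_mk_cons, List.any_cons, List.any_nil,
    slice_to_ofList _ 3 (by norm_num), slice_to_ofList _ 2 (by norm_num),
    slice_to_ofList _ 1 (by norm_num), lit_beq_ofList, ofList_eq_lit]
  simp only [show Int.toNat 3 = 3 from rfl, show Int.toNat 2 = 2 from rfl,
    show Int.toNat 1 = 1 from rfl,
    show ∀ (x y : Char), ([x,y]).take 3 = [x,y] from fun _ _ => rfl,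
    show ∀ (x y : Char), ([x,y]).take 2 = [x,y] from fun _ _ => rfl,
    show ∀ (x y : Char), ([x,y]).take 1 = [x] from fun _ _ => rfl,
    show ∀ (x y : Char), (([x,y]).drop 1).take 1 = [y] from fun _ _ => rfl,
    show ∀ (x y : Char), (([x,y]).drop 2).take 1 = [] from fun _ _ => rfl]
  simp only [show ("52").toList = ['5','2'] from by decide, show ("1").toList = ['1'] from by decide,
    show ("54").toList = ['5','4'] from by decide, show ("57").toList = ['5','7'] from by decide,
    show ("55").toList = ['5','5'] from by decide, show ("34").toList = ['3','4'] from by decide,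
    show ("51").toList = ['5','1'] from by decide, show ("56").toList = ['5','6'] from by decide,
    show ("58").toList = ['5','8'] from by decide, show ("593").toList = ['5','9','3'] from by decide,
    show ("591").toList = ['5','9','1'] from by decide, show ("507").toList = ['5','0','7'] from by decide,
    show ("502").toList = ['5','0','2'] from by decide,
    show ("4").toList = ['4'] from by decide, show ("0").toList = ['0'] from by decide,
    show ("2").toList = ['2'] from by decide, show ("3").toList = ['3'] from by decide,
    show ("5").toList = ['5'] from by decide, show ("6").toList = ['6'] from by decide,
    show ("7").toList = ['7'] from by decide, show ("8").toList = ['8'] from by decide,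
    show ("9").toList = ['9'] from by decide]
  simp only [beq_iff_eq, List.cons.injEq, and_true, Bool.or_eq_true, Bool.false_eq_true, or_false,
    reduceCtorEq, false_and, and_false, false_or]
  by_cases ha1 : '1' = a
  · subst ha1; simp
  by_cases ha3 : '3' = a
  · subst ha3
    by_cases hb4 : '4' = b
    · subst hb4; simp
    · simp [hb4, Ne.symm hb4]
  by_cases ha5 : '5' = a
  · subst ha5
    by_cases hb0 : '0' = b
    · subst hb0; simp
    by_cases hb1 : '1' = b
    · subst hb1; simp
    by_cases hb2 : '2' = b
    · subst hb2; simp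
    by_cases hb4 : '4' = b
    · subst hb4; simp
    by_cases hb5 : '5' = b
    · subst hb5; simp
    by_cases hb6 : '6' = b
    · subst hb6; simp
    by_cases hb7 : '7' = b
    · subst hb7; simp
    by_cases hb8 : '8' = b
    · subst hb8; simp
    by_cases hb9 : '9' = b
    · subst hb9; simp
    · simp [hb0, hb1, hb2, hb4, hb5, hb6, hb7, hb8, hb9, Ne.symm hb0, Ne.symm hb1, Ne.symm hb2,
        Ne.symm hb4, Ne.symm hb5, Ne.symm hb6, Ne.symm hb7, Ne.symm hb8, Ne.symm hb9]
  · simp [ha1, ha3, ha5, Ne.symm ha1, Ne.symm ha3, Ne.symm ha5]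

set_option maxHeartbeats 1000000 in
theorem case_big (a b c : Char) (r : List Char) :
    aLoop (String.ofList (a::b::c::r)) [3,2,1] =
    (match matchCode (String.ofList (a::b::c::r)) with
     | none => none
     | some codigo => some ("https://flagcdn.com/24x18/" ++ codigo ++ ".png")) := by
  simp only [aLoop, matchCode, prefijosPais_eq]
  rw [slice_mid_ofList _ 1 2 (by norm_num) (by norm_num),
      slice_mid_ofList _ 2 3 (by norm_num) (by norm_num)]
  simp only [PySem.Dict.contains_mk, PySem.Dict.get?_mk_cons, List.any_cons, List.any_nil,
    slice_to_ofList _ 3 (by norm_num), slice_to_ofList _ 2 (by norm_num),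
    slice_to_ofList _ 1 (by norm_num), lit_beq_ofList, ofList_eq_lit]
  simp only [show Int.toNat 3 = 3 from rfl, show Int.toNat 2 = 2 from rfl,
    show Int.toNat 1 = 1 from rfl,
    show ∀ (x y z : Char) (r : List Char), (x::y::z::r).take 3 = [x,y,z] from fun _ _ _ _ => rfl,
    show ∀ (x y z : Char) (r : List Char), (x::y::z::r).take 2 = [x,y] from fun _ _ _ _ => rfl,
    show ∀ (x y z : Char) (r : List Char), (x::y::z::r).take 1 = [x] from fun _ _ _ _ => rfl,
    show ∀ (x y z : Char) (r : List Char), ((x::y::z::r).drop 1).take 1 = [y] from fun _ _ _ _ => rfl,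
    show ∀ (x y z : Char) (r : List Char), ((x::y::z::r).drop 2).take 1 = [z] from fun _ _ _ _ => rfl]
  simp only [show ("52").toList = ['5','2'] from by decide, show ("1").toList = ['1'] from by decide,
    show ("54").toList = ['5','4'] from by decide, show ("57").toList = ['5','7'] from by decide,
    show ("55").toList = ['5','5'] from by decide, show ("34").toList = ['3','4'] from by decide,
    show ("51").toList = ['5','1'] from by decide, show ("56").toList = ['5','6'] from by decide,
    show ("58").toList = ['5','8'] from by decide, show ("593").toList = ['5','9','3'] from by decide,
    show ("591").toList = ['5','9','1'] from by decide, show ("507").toList = ['5','0','7'] from by decide,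
    show ("502").toList = ['5','0','2'] from by decide,
    show ("4").toList = ['4'] from by decide, show ("0").toList = ['0'] from by decide,
    show ("2").toList = ['2'] from by decide, show ("3").toList = ['3'] from by decide,
    show ("5").toList = ['5'] from by decide, show ("6").toList = ['6'] from by decide,
    show ("7").toList = ['7'] from by decide, show ("8").toList = ['8'] from by decide,
    show ("9").toList = ['9'] from by decide]
  simp only [beq_iff_eq, List.cons.injEq, and_true, Bool.or_eq_true, Bool.false_eq_true, or_false,
    reduceCtorEq, false_and, and_false, false_or]
  by_cases ha1 : '1' = a
  · subst ha1; simp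
  by_cases ha3 : '3' = a
  · subst ha3
    by_cases hb4 : '4' = b
    · subst hb4; simp
    · simp [hb4, Ne.symm hb4]
  by_cases ha5 : '5' = a
  · subst ha5
    by_cases hb0 : '0' = b
    · subst hb0
      by_cases hc7 : '7' = c
      · subst hc7; simp
      by_cases hc2 : '2' = c
      · subst hc2; simp
      · simp [hc7, hc2, Ne.symm hc7, Ne.symm hc2]
    by_cases hb1 : '1' = b
    · subst hb1; simp
    by_cases hb2 : '2' = b
    · subst hb2; simp
    by_cases hb4 : '4' = b
    · subst hb4; simp
    by_cases hb5 : '5' = b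
    · subst hb5; simp
    by_cases hb6 : '6' = b
    · subst hb6; simp
    by_cases hb7 : '7' = b
    · subst hb7; simp
    by_cases hb8 : '8' = b
    · subst hb8; simp
    by_cases hb9 : '9' = b
    · subst hb9
      by_cases hc3 : '3' = c
      · subst hc3; simp
      by_cases hc1 : '1' = c
      · subst hc1; simp
      · simp [hc3, hc1, Ne.symm hc3, Ne.symm hc1]
    · simp [hb0, hb1, hb2, hb4, hb5, hb6, hb7, hb8, hb9, Ne.symm hb0, Ne.symm hb1, Ne.symm hb2,
        Ne.symm hb4, Ne.symm hb5, Ne.symm hb6, Ne.symm hb7, Ne.symm hb8, Ne.symm hb9]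
  · simp [ha1, ha3, ha5, Ne.symm ha1, Ne.symm ha3, Ne.symm ha5]

theorem core_eq (m : String) :
    aLoop m (PySem.List.pyRange 3 0 (-1)) =
      (match matchCode m with
       | none => none
       | some codigo => some ("https://flagcdn.com/24x18/" ++ codigo ++ ".png")) := by
  rw [show PySem.List.pyRange 3 0 (-1) = [3,2,1] from by decide]
  obtain ⟨l, rfl⟩ : ∃ l, m = String.ofList l := ⟨m.toList, by simp⟩
  match l with
  | [] => exact case_nil
  | [a] => exact case_one a
  | [a, b] => exact case_two a b
  | a :: b :: c :: r => exact case_big a b c r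

-- ===== VERDICT (by name: the statement is the Claim_ definition above) =====
theorem get_country_flag_spec : Claim_equal_get_country_flag := by
  intro n _
  unfold Spec_get_country_flag get_country_flag get_country_flag_alt
  by_cases h : n = ""
  · rw [if_pos h, if_pos h]
  · rw [if_neg h, if_neg h]
    exact core_eq (if PySem.Str.startswith n "+" then PySem.Str.slice n (some 1) none else n)
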